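-- pv_equiv track=rewrite | github.com/pypi-data/pypi-mirror-94 | packages/pyhasse.core/pyhasse.core-0.2.3-py3-none-any.whl/pyhasse/core/order.py | calc_extremales
-- ===== SOURCE A (Python) =====
-- def calc_extremales(zeta, rows):
--     """ Based on zeta-matrix calc. of extremales,
--
--     i.e. maximal, minimal and isolated elements will be determined.
--     based on the set of representative elements
--     :var zeta: zeta-matrix (square matrix)
--     :var rows: number of rows/columns of zeta-matrix
--     :var minel:list of indices pointing to minimal elements
--     :var maxel: list of indices pointing to maximal elements
--     :var isoel: list of indices pointing to isolated elements
--     :return: maxel, minel, isoel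
--
--     """
--     maxel = []
--     sumel = []
--     for i1 in range(0, rows):
--         sumtest = 0
--         for i in range(0, rows):
--             sumtest += zeta[i][i1]
--         sumel.append(sumtest)
--         if sumel[i1] == 1:
--             maxel.append(i1)
--     minel = []
--     sumel = []
--     for i in range(0, rows):
--         sumtest = 0
--         for i1 in range(0, rows):
--             sumtest += zeta[i][i1]
--         sumel.append(sumtest)
--         if sumel[i] == 1:
--             minel.append(i)
--     isoel = []
--     for iob in minel:
--         if iob in maxel:
--             isoel.append(iob)
--     return maxel, minel, isoel
-- ===== SOURCE B (Python) =====
-- def calc_extremales(zeta, rows):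
--     """One fused pass over the matrix: accumulate all column sums and each
--     row sum together, then read the extremal sets off the accumulators."""
--     n = rows if rows > 0 else 0
--     colsum = [0] * n
--     minel = []
--     for i in range(rows):
--         row = zeta[i]
--         s = 0
--         for j in range(rows):
--             v = row[j]
--             s += v
--             colsum[j] += v
--         if s == 1:
--             minel.append(i)
--     maxel = [j for j in range(rows) if colsum[j] == 1]
--     isoel = [i for i in minel if colsum[i] == 1]
--     return maxel, minel, isoel
-- ===== Notes on version B (the rewrite author's own statement) =====
-- stated objective: alternative
-- what changed: A's two separate full-matrix double scans (one per column sums, one per row sums) plus a list-membership scan for isolated elements are replaced by a single fused pass that accumulates all column sums and each row sum together, after which maxel/minel/isoel are read off the accumulators.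
import Mathlib
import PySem

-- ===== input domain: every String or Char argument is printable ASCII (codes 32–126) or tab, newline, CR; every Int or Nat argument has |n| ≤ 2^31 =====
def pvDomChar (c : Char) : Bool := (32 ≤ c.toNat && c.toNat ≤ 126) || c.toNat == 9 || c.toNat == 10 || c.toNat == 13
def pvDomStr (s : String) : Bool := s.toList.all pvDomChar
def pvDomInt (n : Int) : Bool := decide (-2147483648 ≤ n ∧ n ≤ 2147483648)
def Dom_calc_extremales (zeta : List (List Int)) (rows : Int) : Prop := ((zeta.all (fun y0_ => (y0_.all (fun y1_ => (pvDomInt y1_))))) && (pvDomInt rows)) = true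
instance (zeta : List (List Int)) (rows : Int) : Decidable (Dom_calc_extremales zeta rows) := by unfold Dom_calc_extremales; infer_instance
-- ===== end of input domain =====

-- B fuses A's two separate full-matrix double scans into one pass that accumulates
-- all column sums and each row sum together (objective: alternative decomposition).

-- ===== PORT A =====
-- zeta[i][j] (both indices in range on Pre_; pyGetD is exact there)
def pvCell (zeta : List (List Int)) (i j : Int) : Int :=
  PySem.List.pyGetD (PySem.List.pyGetD zeta i []) j 0

def calc_extremales (zeta : List (List Int)) (rows : Int) : List Int × List Int × List Int :=
  let r := PySem.List.pyRange 0 rows 1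
  -- first loop: column sums, maxel
  let p1 := r.foldl (fun (acc : List Int × List Int) i1 =>
      let sumtest := r.foldl (fun s i => s + pvCell zeta i i1) 0
      let sumel := acc.2 ++ [sumtest]
      (if PySem.List.pyGetD sumel i1 0 == 1 then acc.1 ++ [i1] else acc.1, sumel)) ([], [])
  let maxel := p1.1
  -- second loop: row sums, minel
  let p2 := r.foldl (fun (acc : List Int × List Int) i =>
      let sumtest := r.foldl (fun s i1 => s + pvCell zeta i i1) 0
      let sumel := acc.2 ++ [sumtest]
      (if PySem.List.pyGetD sumel i 0 == 1 then acc.1 ++ [i] else acc.1, sumel)) ([], [])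
  let minel := p2.1
  -- third loop: isolated elements
  let isoel := minel.foldl (fun acc iob => if maxel.contains iob then acc ++ [iob] else acc) []
  (maxel, minel, isoel)

-- ===== PORT B =====
def calc_extremales_alt (zeta : List (List Int)) (rows : Int) : List Int × List Int × List Int :=
  let r := PySem.List.pyRange 0 rows 1
  let n := rows.toNat                       -- len([0] * rows)
  let st := r.foldl (fun (acc : List Int × List Int) i =>
      let row := PySem.List.pyGetD zeta i []
      let p := r.foldl (fun (p : Int × List Int) j =>
          let v := PySem.List.pyGetD row j 0
          (p.1 + v, p.2.set j.toNat (PySem.List.pyGetD p.2 j 0 + v))) (0, acc.1)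
      (p.2, if p.1 == 1 then acc.2 ++ [i] else acc.2)) (List.replicate n 0, [])
  let colsum := st.1
  let minel := st.2
  let maxel := r.filter (fun j => PySem.List.pyGetD colsum j 0 == 1)
  let isoel := minel.filter (fun i => PySem.List.pyGetD colsum i 0 == 1)
  (maxel, minel, isoel)

-- ===== PRECONDITION & SPEC =====
-- Pre_ excludes exactly the inputs where Python A raises IndexError: rows > 0 and
-- the matrix has fewer than `rows` rows, or one of its first `rows` rows is shorter than `rows`.
def Pre_calc_extremales (zeta : List (List Int)) (rows : Int) : Prop :=
  rows ≤ 0 ∨ (rows ≤ (zeta.length : Int) ∧ ∀ row ∈ zeta.take rows.toNat, rows ≤ (row.length : Int))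
instance (zeta : List (List Int)) (rows : Int) : Decidable (Pre_calc_extremales zeta rows) := by
  unfold Pre_calc_extremales; infer_instance
def pvWitness_calc_extremales : List (List Int) × Int := ([[1, 1], [0, 1]], 2)

def Spec_calc_extremales (zeta : List (List Int)) (rows : Int) (out : List Int × List Int × List Int) : Prop := out = calc_extremales_alt zeta rows
instance (zeta : List (List Int)) (rows : Int) (out : List Int × List Int × List Int) : Decidable (Spec_calc_extremales zeta rows out) := by unfold Spec_calc_extremales; infer_instance

-- ===== CLAIM (what is proved, stated in full; the proofs are below) =====
def Claim_equal_calc_extremales : Prop := ∀ (zeta : List (List Int)) (rows : Int), Dom_calc_extremales zeta rows → Pre_calc_extremales zeta rows → Spec_calc_extremales zeta rows (calc_extremales zeta rows)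

-- ===== LEMMAS AND PROOFS =====

-- canonical column / row sums (proof-only helpers)
def colA (zeta : List (List Int)) (rows k : Int) : Int :=
  (PySem.List.pyRange 0 rows 1).foldl (fun s i => s + pvCell zeta i k) 0
def rowA (zeta : List (List Int)) (rows i : Int) : Int :=
  (PySem.List.pyRange 0 rows 1).foldl (fun s j => s + pvCell zeta i j) 0
-- proof-only names for B's loop bodies (definitionally the closures in calc_extremales_alt)
def innerStep (zeta : List (List Int)) (i : Int) : Int × List Int → Int → Int × List Int :=
  fun p j =>
    let v := PySem.List.pyGetD (PySem.List.pyGetD zeta i []) j 0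
    (p.1 + v, p.2.set j.toNat (PySem.List.pyGetD p.2 j 0 + v))
def outerStep (zeta : List (List Int)) (rows : Int) :
    List Int × List Int → Int → List Int × List Int :=
  fun acc i =>
    let p := (PySem.List.pyRange 0 rows 1).foldl (innerStep zeta i) (0, acc.1)
    (p.2, if p.1 == 1 then acc.2 ++ [i] else acc.2)

lemma getD_append_len (su : List Int) (st : Int) (a : Int) (h0 : 0 ≤ a) (h : su.length = a.toNat) :
    PySem.List.pyGetD (su ++ [st]) a 0 = st := by
  have h2 : a = (su.length : Int) := by omega
  subst h2
  simp [pysem]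

-- shape of A's two accumulation loops
lemma A_loop (cond : Int → Int) (b : Int) : ∀ (N : ℕ) (a : Int), 0 ≤ a → (b - a).toNat = N →
    ∀ (mx su : List Int), su.length = a.toNat →
    ((PySem.List.pyRange a b 1).foldl (fun (acc : List Int × List Int) i =>
        (if PySem.List.pyGetD (acc.2 ++ [cond i]) i 0 == 1 then acc.1 ++ [i] else acc.1,
         acc.2 ++ [cond i])) (mx, su)).1
      = mx ++ (PySem.List.pyRange a b 1).filter (fun i => cond i == 1) := by
  intro N
  induction N with
  | zero =>
      intro a h0 hN mx su hsu
      rw [PySem.List.pyRange_one_eq_nil (by omega)]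
      simp
  | succ N ih =>
      intro a h0 hN mx su hsu
      rw [PySem.List.pyRange_one_cons (by omega)]
      simp only [List.foldl_cons, List.filter_cons]
      rw [getD_append_len su (cond a) a h0 hsu]
      rw [ih (a + 1) (by omega) (by omega) _ (su ++ [cond a]) (by simp [hsu]; omega)]
      by_cases hc : cond a == 1 <;> simp [hc]

-- B's inner loop: running row sum, pointwise column-sum update, length preserved
lemma inner_loop (zeta : List (List Int)) (i : Int) (b : Int) :
    ∀ (N : ℕ) (a : Int), 0 ≤ a → (b - a).toNat = N → ∀ (s : Int) (cs : List Int),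
    ((PySem.List.pyRange a b 1).foldl (innerStep zeta i) (s, cs)).1
        = (PySem.List.pyRange a b 1).foldl (fun t j => t + pvCell zeta i j) s
    ∧ ((PySem.List.pyRange a b 1).foldl (innerStep zeta i) (s, cs)).2.length = cs.length
    ∧ ∀ k : Int, 0 ≤ k → k.toNat < cs.length →
        PySem.List.pyGetD ((PySem.List.pyRange a b 1).foldl (innerStep zeta i) (s, cs)).2 k 0
          = PySem.List.pyGetD cs k 0 + (if a ≤ k ∧ k < b then pvCell zeta i k else 0) := by
  intro N
  induction N with
  | zero =>
      intro a h0 hN s cs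
      rw [PySem.List.pyRange_one_eq_nil (by omega)]
      refine ⟨rfl, rfl, ?_⟩
      intro k hk hkl
      rw [if_neg (by omega)]
      simp
  | succ N ih =>
      intro a h0 hN s cs
      rw [PySem.List.pyRange_one_cons (by omega)]
      simp only [List.foldl_cons]
      have hstep : innerStep zeta i (s, cs) a
          = (s + pvCell zeta i a, cs.set a.toNat (PySem.List.pyGetD cs a 0 + pvCell zeta i a)) := rfl
      rw [hstep]
      obtain ⟨h1, h2, h3⟩ := ih (a + 1) (by omega) (by omega)
        (s + pvCell zeta i a) (cs.set a.toNat (PySem.List.pyGetD cs a 0 + pvCell zeta i a))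
      refine ⟨h1, by rw [h2]; simp, ?_⟩
      intro k hk hkl
      rw [h3 k hk (by simpa using hkl)]
      by_cases hka : k = a
      · subst hka
        rw [PySem.List.pyGetD_of_nonneg _ _ hk, List.getD, List.getElem?_set]
        simp only [hkl, if_true, Option.getD_some]
        rw [if_neg (by omega), if_pos (by omega)]
        simp [List.getD, List.getElem?_eq_getElem hkl, PySem.List.pyGetD_of_nonneg _ _ hk]
      · have hne : a.toNat ≠ k.toNat := by omega
        rw [PySem.List.pyGetD_of_nonneg _ _ hk, List.getD, List.getElem?_set, if_neg (by omega)]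
        rw [← List.getD, ← PySem.List.pyGetD_of_nonneg cs (0:Int) hk]
        by_cases hik : a ≤ k ∧ k < b
        · rw [if_pos (by omega), if_pos hik]
        · rw [if_neg (by omega), if_neg hik]

-- B's fused outer loop: column sums pointwise, minel as a filter
lemma outer_loop (zeta : List (List Int)) (rows : Int) :
    ∀ (N : ℕ) (a : Int), 0 ≤ a → (rows - a).toNat = N → ∀ (cs m : List Int), cs.length = rows.toNat →
    ((PySem.List.pyRange a rows 1).foldl (outerStep zeta rows) (cs, m)).1.length = rows.toNat
    ∧ (∀ k : Int, 0 ≤ k → k < rows →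
        PySem.List.pyGetD ((PySem.List.pyRange a rows 1).foldl (outerStep zeta rows) (cs, m)).1 k 0
          = (PySem.List.pyRange a rows 1).foldl (fun s i => s + pvCell zeta i k) (PySem.List.pyGetD cs k 0))
    ∧ ((PySem.List.pyRange a rows 1).foldl (outerStep zeta rows) (cs, m)).2
        = m ++ (PySem.List.pyRange a rows 1).filter (fun i => rowA zeta rows i == 1) := by
  intro N
  induction N with
  | zero =>
      intro a h0 hN cs m hcs
      rw [PySem.List.pyRange_one_eq_nil (by omega)]
      exact ⟨hcs, fun k hk hkr => rfl, by simp⟩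
  | succ N ih =>
      intro a h0 hN cs m hcs
      rw [PySem.List.pyRange_one_cons (by omega)]
      simp only [List.foldl_cons, List.filter_cons]
      obtain ⟨if1, if2, if3⟩ := inner_loop zeta a rows rows.toNat 0 le_rfl (by omega) 0 cs
      have hstep : outerStep zeta rows (cs, m) a
          = (((PySem.List.pyRange 0 rows 1).foldl (innerStep zeta a) (0, cs)).2,
             if rowA zeta rows a == 1 then m ++ [a] else m) := by
        show (_, if ((PySem.List.pyRange 0 rows 1).foldl (innerStep zeta a) (0, cs)).1 == 1 then _ else _) = _
        rw [if1]
        rfl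
      rw [hstep]
      obtain ⟨g1, g2, g3⟩ := ih (a + 1) (by omega) (by omega)
        ((PySem.List.pyRange 0 rows 1).foldl (innerStep zeta a) (0, cs)).2
        (if rowA zeta rows a == 1 then m ++ [a] else m) (by rw [if2, hcs])
      refine ⟨g1, ?_, ?_⟩
      · intro k hk hkr
        rw [g2 k hk hkr, if3 k hk (by omega)]
        rw [if_pos ⟨hk, hkr⟩]
      · rw [g3]
        by_cases hc : rowA zeta rows a == 1 <;> simp [hc]

lemma getD_replicate_zero (n : ℕ) (k : Int) (h0 : 0 ≤ k) (hlt : k.toNat < n) :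
    PySem.List.pyGetD (List.replicate n (0:Int)) k 0 = 0 := by
  simp [PySem.List.pyGetD_of_nonneg _ _ h0, List.getD, hlt]

-- ===== VERDICT (by name: the statement is the Claim_ definition above) =====
theorem calc_extremales_spec : Claim_equal_calc_extremales := by
  intro zeta rows _hdom _hpre
  unfold Spec_calc_extremales
  -- canonical values
  set r := PySem.List.pyRange 0 rows 1 with hr
  set maxC := r.filter (fun j => colA zeta rows j == 1) with hmaxC
  set minC := r.filter (fun i => rowA zeta rows i == 1) with hminC
  -- B's fused-loop state
  set B0 : List Int × List Int := r.foldl (outerStep zeta rows) (List.replicate rows.toNat 0, []) with hB0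
  obtain ⟨hL, hPt, hMin⟩ := outer_loop zeta rows rows.toNat 0 le_rfl (by omega)
    (List.replicate rows.toNat 0) [] (by simp)
  have hcol : ∀ k : Int, 0 ≤ k → k < rows → PySem.List.pyGetD B0.1 k 0 = colA zeta rows k := by
    intro k hk hkr
    rw [hB0, hPt k hk hkr, getD_replicate_zero rows.toNat k hk (by omega)]
    rfl
  -- A's components
  have e1 : (calc_extremales zeta rows).1 = [] ++ maxC :=
    A_loop (fun i1 => colA zeta rows i1) rows rows.toNat 0 le_rfl (by omega) [] [] rfl
  rw [List.nil_append] at e1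
  have e2 : (calc_extremales zeta rows).2.1 = [] ++ minC :=
    A_loop (fun i => rowA zeta rows i) rows rows.toNat 0 le_rfl (by omega) [] [] rfl
  rw [List.nil_append] at e2
  have e3 : (calc_extremales zeta rows).2.2
      = (calc_extremales zeta rows).2.1.foldl
          (fun acc iob => if (calc_extremales zeta rows).1.contains iob then acc ++ [iob] else acc) [] := rfl
  rw [e1, e2] at e3
  have e3' : (calc_extremales zeta rows).2.2 = minC.filter (fun i => maxC.contains i) := by
    rw [e3]; simpa using PySem.List.foldl_append_if (fun i => maxC.contains i) id minC []
  -- B's components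
  have f1 : (calc_extremales_alt zeta rows).1 = r.filter (fun j => PySem.List.pyGetD B0.1 j 0 == 1) := rfl
  have f2 : (calc_extremales_alt zeta rows).2.1 = B0.2 := rfl
  have f3 : (calc_extremales_alt zeta rows).2.2 = B0.2.filter (fun i => PySem.List.pyGetD B0.1 i 0 == 1) := rfl
  have hBmin : B0.2 = minC := by rw [hB0, hMin]; rfl
  have f1' : (calc_extremales_alt zeta rows).1 = maxC := by
    rw [f1, hmaxC]
    refine List.filter_congr ?_
    intro j hj
    obtain ⟨hj0, hjr⟩ := (PySem.List.mem_pyRange_one).1 hj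
    rw [hcol j hj0 hjr]
  have f3' : (calc_extremales_alt zeta rows).2.2 = minC.filter (fun i => maxC.contains i) := by
    rw [f3, hBmin]
    refine (List.filter_congr ?_).symm
    intro i hi
    have hir : i ∈ r := List.mem_of_mem_filter hi
    obtain ⟨hi0, hirr⟩ := (PySem.List.mem_pyRange_one).1 hir
    have : (i ∈ maxC) ↔ (PySem.List.pyGetD B0.1 i 0 == 1) = true := by
      rw [hmaxC, List.mem_filter, hcol i hi0 hirr]
      simp [hir]
    cases h : (PySem.List.pyGetD B0.1 i 0 == 1) <;>
      simp [this, h]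
  have hA : calc_extremales zeta rows
      = ((calc_extremales zeta rows).1, (calc_extremales zeta rows).2.1, (calc_extremales zeta rows).2.2) := rfl
  have hB : calc_extremales_alt zeta rows
      = ((calc_extremales_alt zeta rows).1, (calc_extremales_alt zeta rows).2.1, (calc_extremales_alt zeta rows).2.2) := rfl
  rw [hA, hB, e1, e2, e3', f1', f2, hBmin, f3']
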